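-- pv_equiv track=rewrite | github.com/ScottS45/Xantrex-Rvc-VenusOS | xantrex-service.py | safe_ascii
-- ===== SOURCE A (Python) =====
-- def safe_ascii(data_slice):
--     if all(b == 0xFF for b in data_slice):
--         return None
--     try:
--         cleaned = bytes(data_slice).rstrip(b'\xFF')  # <-- convert then rstrip
--         return cleaned.decode('ascii').strip()
--     except UnicodeDecodeError:
--         return None
-- ===== SOURCE B (Python) =====
-- def safe_ascii(data_slice):
--     chars = []
--     ff_seen = False
--     for b in data_slice:
--         if b == 0xFF:
--             ff_seen = True
--         elif ff_seen:
--             return None        # interior 0xFF byte: ASCII decode would fail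
--         elif b > 0x7F:
--             return None        # non-ASCII byte
--         else:
--             chars.append(chr(b))
--     if not chars:
--         return None            # empty or all-0xFF input
--     return ''.join(chars).strip()
-- ===== Notes on version B (the rewrite author's own statement) =====
-- stated objective: alternative
-- what changed: Replaces A's staged pipeline (all-0xFF pre-scan, bytes() conversion, rstrip, decode, strip) with a single forward pass that builds the output characters directly in an accumulator, using a seen-0xFF flag to detect interior 0xFF (decode failure) with early return and dropping trailing 0xFF by simply never appending them.
import Mathlib
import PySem

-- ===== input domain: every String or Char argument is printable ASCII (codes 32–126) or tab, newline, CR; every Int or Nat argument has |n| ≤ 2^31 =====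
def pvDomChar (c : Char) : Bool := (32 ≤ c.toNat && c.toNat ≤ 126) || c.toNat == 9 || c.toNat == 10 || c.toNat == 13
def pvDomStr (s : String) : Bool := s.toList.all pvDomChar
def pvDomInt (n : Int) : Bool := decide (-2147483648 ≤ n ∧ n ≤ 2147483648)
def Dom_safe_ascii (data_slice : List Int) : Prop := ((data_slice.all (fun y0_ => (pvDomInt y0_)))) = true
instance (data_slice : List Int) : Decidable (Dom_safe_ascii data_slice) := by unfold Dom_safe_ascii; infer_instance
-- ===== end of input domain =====

-- B replaces A's staged pipeline (all-0xFF pre-scan, rstrip, decode) by ONE forward pass with a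
-- character accumulator and a seen-0xFF flag (early None on interior 0xFF or non-ASCII bytes).
-- Objective: alternative decomposition, same O(n) cost.
-- ===== PORT A =====
def safe_ascii (data_slice : List Int) : Option String :=
  -- if all(b == 0xFF for b in data_slice): return None
  if data_slice.all (fun b => b == 255) then none
  else
    -- cleaned = bytes(data_slice).rstrip(b'\xFF')  (rstrip ported as reverse/dropWhile/reverse)
    let cleaned := (data_slice.reverse.dropWhile (fun b => b == 255)).reverse
    -- cleaned.decode('ascii').strip(), None on UnicodeDecodeError (a byte > 127)
    if cleaned.all (fun b => decide (b ≤ 127)) then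
      some (PySem.Str.strip (String.ofList (cleaned.map (fun b => Char.ofNat b.toNat))))
    else none

-- ===== PORT B =====
-- the for-loop of Source B: chars accumulator + ff_seen flag, early return as Option
def saLoop (l : List Int) (chars : List Char) (ffSeen : Bool) : Option (List Char) :=
  match l with
  | [] => some chars
  | b :: rest =>
    if b == 255 then saLoop rest chars true
    else if ffSeen then none
    else if decide (b > 127) then none
    else saLoop rest (chars ++ [Char.ofNat b.toNat]) ffSeen

def safe_ascii_alt (data_slice : List Int) : Option String :=
  match saLoop data_slice [] false with
  | none => none
  | some [] => none
  | some chars => some (PySem.Str.strip (String.ofList chars))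

-- ===== PRECONDITION & SPEC =====
-- Pre_ excludes exactly the inputs where Python's bytes() raises ValueError (an element outside
-- 0..255); A returns on no such input (an out-of-range element rules out the all-0xFF early return).
def Pre_safe_ascii (data_slice : List Int) : Prop := ∀ b ∈ data_slice, 0 ≤ b ∧ b ≤ 255
instance (data_slice : List Int) : Decidable (Pre_safe_ascii data_slice) := by unfold Pre_safe_ascii; infer_instance
def pvWitness_safe_ascii : List Int := [72, 105, 255]
def Spec_safe_ascii (data_slice : List Int) (out : Option String) : Prop := out = safe_ascii_alt data_slice
instance (data_slice : List Int) (out : Option String) : Decidable (Spec_safe_ascii data_slice out) := by unfold Spec_safe_ascii; infer_instance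

-- ===== CLAIM (what is proved, stated in full; the proofs are below) =====
def Claim_equal_safe_ascii : Prop := ∀ (data_slice : List Int), Dom_safe_ascii data_slice → Pre_safe_ascii data_slice → Spec_safe_ascii data_slice (safe_ascii data_slice)

-- ===== LEMMAS AND PROOFS =====
-- the rstrip result is empty iff every byte is 0xFF
theorem cleaned_nil_iff (ds : List Int) :
    (ds.reverse.dropWhile (fun b => b == 255)).reverse = [] ↔ ds.all (fun b => b == 255) = true := by
  simp [List.dropWhile_eq_nil_iff, List.all_eq_true]

-- rstrip on a cons: nothing stripped from the front unless the whole tail (and head) is 0xFF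
theorem cleaned_cons (b : Int) (rest : List Int) :
    ((b :: rest).reverse.dropWhile (fun x => x == 255)).reverse =
      if rest.all (fun x => x == 255) = true then
        (if b == 255 then ([] : List Int) else [b])
      else b :: (rest.reverse.dropWhile (fun x => x == 255)).reverse := by
  by_cases h : rest.all (fun x => x == 255) = true
  · have hnil : rest.reverse.dropWhile (fun x => x == 255) = [] := by
      have := (cleaned_nil_iff rest).mpr h
      simpa using this
    simp [List.dropWhile_append, hnil]
    by_cases hb : b = 255
    · simp only [hb]
      simpa [List.all_eq_true] using h
    · simp [hb]
  · have hne : ¬ rest.reverse.dropWhile (fun x => x == 255) = [] := by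
      intro hc
      exact h ((cleaned_nil_iff rest).mp (by simpa using hc))
    simp [List.dropWhile_append, List.isEmpty_iff, hne, h]

-- after a 0xFF has been seen, the loop succeeds iff the remainder is all 0xFF
theorem saLoop_true (l : List Int) (acc : List Char) :
    saLoop l acc true = if l.all (fun b => b == 255) = true then some acc else none := by
  induction l with
  | nil => simp [saLoop]
  | cons b rest ih =>
    by_cases hb : b = 255
    · simp [saLoop, hb, ih]
    · simp [saLoop, hb]

-- the loop from the clean state computes exactly A's (rstrip; all ≤127; map) pipeline
theorem saLoop_spec (l : List Int) (acc : List Char) :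
    saLoop l acc false =
      (let c := (l.reverse.dropWhile (fun x => x == 255)).reverse
       if c.all (fun b => decide (b ≤ 127)) = true
       then some (acc ++ c.map (fun b => Char.ofNat b.toNat)) else none) := by
  induction l generalizing acc with
  | nil => simp [saLoop]
  | cons b rest ih =>
    simp only [cleaned_cons]
    by_cases hb : b = 255
    · subst hb
      simp only [saLoop, saLoop_true]
      by_cases h : rest.all (fun x => x == 255) = true
      · simp [h]
      · -- cleaned contains the leading 255 which is > 127
        simp [h]
    · by_cases hgt : decide (b > 127) = true
      · have hb127 : ¬ (b ≤ 127) := by simpa using hgt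
        by_cases h : rest.all (fun x => x == 255) = true <;>
          simp [saLoop, hb, hgt, h, hb127]
      · have hb127 : b ≤ 127 := by simpa using hgt
        have hrec := ih (acc ++ [Char.ofNat b.toNat])
        by_cases h : rest.all (fun x => x == 255) = true
        · have hnil : (rest.reverse.dropWhile (fun x => x == 255)).reverse = [] :=
            (cleaned_nil_iff rest).mpr h
          simp [saLoop, hb, hgt, h, hb127, hrec, hnil]
        · simp [saLoop, hb, hgt, h, hb127, hrec]

-- ===== VERDICT (by name: the statement is the Claim_ definition above) =====
theorem safe_ascii_spec : Claim_equal_safe_ascii := by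
  intro ds _ _
  unfold Spec_safe_ascii safe_ascii safe_ascii_alt
  rw [saLoop_spec]
  by_cases hall : ds.all (fun b => b == 255) = true
  · have hnil : (ds.reverse.dropWhile (fun x => x == 255)).reverse = [] :=
      (cleaned_nil_iff ds).mpr hall
    simp [hall, hnil]
  · have hne : ¬ (ds.reverse.dropWhile (fun x => x == 255)).reverse = [] := by
      intro hc; exact hall ((cleaned_nil_iff ds).mp hc)
    by_cases h127 : ((ds.reverse.dropWhile (fun x => x == 255)).reverse.all
        (fun b => decide (b ≤ 127))) = true
    · simp only [hall, h127, if_true]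
      cases hmap : (ds.reverse.dropWhile (fun x => x == 255)).reverse with
      | nil => exact absurd hmap hne
      | cons x xs => simp
    · simp [hall, h127]
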